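-- pv_equiv track=rewrite | github.com/rhpvorderman/kmer-adapter | kmer-adapter.py | minimize_kmer_search_list
-- ===== SOURCE A (Python) =====
-- from typing import List, Optional, Set, Tuple
-- from collections import defaultdict
--
-- def minimize_kmer_search_list(
--     kmer_search_list: List[Tuple[str, int, Optional[int]]]
-- ) -> List[Tuple[str, int, Optional[int]]]:
--     kmer_and_offsets_dict = defaultdict(list)
--     for kmer, start, stop in kmer_search_list:  # type: ignore
--         kmer_and_offsets_dict[kmer].append((start, stop))
--     kmers_and_positions: List[Tuple[str, int, Optional[int]]] = []
--     for kmer, positions in kmer_and_offsets_dict.items():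
--         if len(positions) == 1:
--             start, stop = positions[0]
--             kmers_and_positions.append((kmer, start, stop))
--             continue
--         if (0, None) in positions:
--             kmers_and_positions.append((kmer, 0, None))
--             continue
--         front_searches = [(start, stop) for start, stop in positions if start == 0]
--         back_searches = [(start, stop) for start, stop in positions if stop is None]
--         middle_searches = [
--             (start, stop)
--             for start, stop in positions
--             if start != 0 and stop is not None
--         ]
--         if middle_searches:
--             raise NotImplementedError(
--                 "Situations with searches starting in the middle have not been considered."
--             )
--         if front_searches:
--             # (0, None) condition is already catched, so stop is never None.
--             kmers_and_positions.append(
--                 (kmer, 0, max(stop for start, stop in front_searches))  # type: ignore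
--             )
--         if back_searches:
--             kmers_and_positions.append(
--                 (kmer, min(start for start, stop in back_searches), None)
--             )
--     return kmers_and_positions
-- ===== SOURCE B (Python) =====
-- from typing import List, Optional, Tuple
--
--
-- def minimize_kmer_search_list(
--     kmer_search_list: List[Tuple[str, int, Optional[int]]]
-- ) -> List[Tuple[str, int, Optional[int]]]:
--     kmer_and_offsets_dict = {}
--     for kmer, start, stop in kmer_search_list:
--         kmer_and_offsets_dict.setdefault(kmer, []).append((start, stop))
--     result: List[Tuple[str, int, Optional[int]]] = []
--     for kmer, positions in kmer_and_offsets_dict.items():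
--         if len(positions) == 1:
--             start, stop = positions[0]
--             result.append((kmer, start, stop))
--             continue
--         # One accumulation pass over the group instead of a membership test
--         # plus three comprehensions plus max()/min().
--         saw_full = False
--         has_front = False
--         max_front = 0
--         has_back = False
--         min_back = 0
--         has_middle = False
--         for start, stop in positions:
--             if stop is None:
--                 if start == 0:
--                     saw_full = True
--                 else:
--                     if not has_back or start < min_back:
--                         min_back = start
--                     has_back = True
--             elif start == 0:
--                 if not has_front or stop > max_front:
--                     max_front = stop
--                 has_front = True
--             else:
--                 has_middle = True
--         if saw_full:
--             result.append((kmer, 0, None))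
--         elif has_middle:
--             raise NotImplementedError(
--                 "Situations with searches starting in the middle "
--                 "have not been considered."
--             )
--         else:
--             if has_front:
--                 result.append((kmer, 0, max_front))
--             if has_back:
--                 result.append((kmer, min_back, None))
--     return result
-- ===== Notes on version B (the rewrite author's own statement) =====
-- stated objective: simpler
-- what changed: B keeps the same per-kmer grouping dict but replaces A's per-group membership test plus three list comprehensions plus max()/min() calls by a single accumulation pass over each group maintaining saw_full/has_front/max_front/has_back/min_back/has_middle.
import Mathlib
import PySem

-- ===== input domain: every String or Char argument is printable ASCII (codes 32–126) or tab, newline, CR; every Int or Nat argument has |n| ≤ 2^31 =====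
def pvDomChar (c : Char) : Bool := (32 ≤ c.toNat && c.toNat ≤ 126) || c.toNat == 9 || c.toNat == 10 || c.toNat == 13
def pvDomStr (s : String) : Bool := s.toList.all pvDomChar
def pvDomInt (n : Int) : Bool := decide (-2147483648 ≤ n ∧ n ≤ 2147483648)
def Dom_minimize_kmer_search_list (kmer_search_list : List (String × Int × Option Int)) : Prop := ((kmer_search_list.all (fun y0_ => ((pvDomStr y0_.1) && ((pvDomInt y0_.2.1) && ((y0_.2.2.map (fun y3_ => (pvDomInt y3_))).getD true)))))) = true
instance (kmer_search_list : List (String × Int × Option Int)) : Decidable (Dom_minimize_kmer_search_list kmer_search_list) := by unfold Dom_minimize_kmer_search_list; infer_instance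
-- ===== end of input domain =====

-- B replaces A's per-group membership test + three comprehensions + max()/min() by a single
-- accumulation pass over each group (objective: simpler per-group processing, same grouping).

-- ===== PORT A =====
-- Python's max over the (all-integer, nonempty in every reachable call) stop values of the
-- front searches; exact whenever the list is nonempty and every element is `some`.
def pyMaxStops (l : List (Option Int)) : Option Int :=
  match l.filterMap id with
  | [] => none
  | x :: xs => some (xs.foldl max x)

-- Python's min over a nonempty list of ints (back-search starts); exact when nonempty.
def pyMinInts (l : List Int) : Int :=
  match l with
  | [] => 0
  | x :: xs => xs.foldl min x

-- One iteration of A's loop over the grouped dict's items; `none` models the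
-- NotImplementedError raised on middle searches (excluded by Pre_).
def stepA (acc? : Option (List (String × Int × Option Int)))
    (item : String × List (Int × Option Int)) : Option (List (String × Int × Option Int)) :=
  match acc? with
  | none => none
  | some acc =>
    let k := item.1
    let positions := item.2
    if positions.length == 1 then
      match positions with
      | (s, t) :: _ => some (acc ++ [(k, s, t)])
      | [] => some acc
    else if positions.contains ((0 : Int), (none : Option Int)) then
      some (acc ++ [(k, 0, none)])
    else
      let front := positions.filter (fun p => p.1 == 0)
      let back := positions.filter (fun p => p.2 == none)
      let middle := positions.filter (fun p => p.1 != 0 && p.2 != none)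
      if !middle.isEmpty then none
      else
        let acc1 := if !front.isEmpty then acc ++ [(k, 0, pyMaxStops (front.map (·.2)))] else acc
        some (if !back.isEmpty then acc1 ++ [(k, pyMinInts (back.map (·.1)), none)] else acc1)

def minimize_kmer_search_list (kmer_search_list : List (String × Int × Option Int)) :
    List (String × Int × Option Int) :=
  let d := kmer_search_list.foldl
    (fun d p => d.modify p.1 [] (· ++ [p.2])) (PySem.Dict.empty : PySem.Dict String (List (Int × Option Int)))
  (d.items.foldl stepA (some [])).getD []

-- ===== PORT B =====
-- The six loop variables of B's accumulation pass.
structure MState where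
  sawFull : Bool
  hasFront : Bool
  maxFront : Int
  hasBack : Bool
  minBack : Int
  hasMiddle : Bool
deriving Repr, DecidableEq

def updB (st : MState) (p : Int × Option Int) : MState :=
  match p.2 with
  | none =>
    if p.1 == 0 then { st with sawFull := true }
    else { st with
           minBack := if !st.hasBack || p.1 < st.minBack then p.1 else st.minBack,
           hasBack := true }
  | some v =>
    if p.1 == 0 then
      { st with
        maxFront := if !st.hasFront || v > st.maxFront then v else st.maxFront,
        hasFront := true }
    else { st with hasMiddle := true }

def stepB (acc? : Option (List (String × Int × Option Int)))
    (item : String × List (Int × Option Int)) : Option (List (String × Int × Option Int)) :=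
  match acc? with
  | none => none
  | some acc =>
    let k := item.1
    let positions := item.2
    if positions.length == 1 then
      match positions with
      | (s, t) :: _ => some (acc ++ [(k, s, t)])
      | [] => some acc
    else
      let st := positions.foldl updB ⟨false, false, 0, false, 0, false⟩
      if st.sawFull then some (acc ++ [(k, 0, none)])
      else if st.hasMiddle then none   -- NotImplementedError (excluded by Pre_)
      else
        let acc1 := if st.hasFront then acc ++ [(k, 0, some st.maxFront)] else acc
        some (if st.hasBack then acc1 ++ [(k, st.minBack, none)] else acc1)

def minimize_kmer_search_list_alt (kmer_search_list : List (String × Int × Option Int)) :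
    List (String × Int × Option Int) :=
  let d := kmer_search_list.foldl
    (fun d p => d.modify p.1 [] (· ++ [p.2])) (PySem.Dict.empty : PySem.Dict String (List (Int × Option Int)))
  (d.items.foldl stepB (some [])).getD []

-- ===== PRECONDITION & SPEC =====
-- Pre_ excludes exactly the inputs on which A (and B) raise NotImplementedError: a "middle"
-- search (start ≠ 0 and stop ≠ None) whose kmer occurs at least twice and has no full
-- (0, None) search.  On every other input A returns normally.
def Pre_minimize_kmer_search_list (kmer_search_list : List (String × Int × Option Int)) : Prop :=
  ∀ p ∈ kmer_search_list,
    (kmer_search_list.filter (fun q => q.1 == p.1)).length ≤ 1 ∨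
    (p.1, (0 : Int), (none : Option Int)) ∈ kmer_search_list ∨
    p.2.1 = 0 ∨ p.2.2 = none

instance (kmer_search_list : List (String × Int × Option Int)) :
    Decidable (Pre_minimize_kmer_search_list kmer_search_list) := by
  unfold Pre_minimize_kmer_search_list; infer_instance

def pvWitness_minimize_kmer_search_list : (List (String × Int × Option Int)) :=
  [("AC", 0, some 5), ("AC", 0, some 3), ("AC", 4, none), ("GT", 2, some 7)]

def Spec_minimize_kmer_search_list (kmer_search_list : List (String × Int × Option Int))
    (out : List (String × Int × Option Int)) : Prop :=
  out = minimize_kmer_search_list_alt kmer_search_list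

instance (kmer_search_list : List (String × Int × Option Int))
    (out : List (String × Int × Option Int)) :
    Decidable (Spec_minimize_kmer_search_list kmer_search_list out) := by
  unfold Spec_minimize_kmer_search_list; infer_instance

-- ===== CLAIM (what is proved, stated in full; the proofs are below) =====
def Claim_equal_minimize_kmer_search_list : Prop :=
  ∀ (kmer_search_list : List (String × Int × Option Int)),
    Dom_minimize_kmer_search_list kmer_search_list →
    Pre_minimize_kmer_search_list kmer_search_list →
    Spec_minimize_kmer_search_list kmer_search_list (minimize_kmer_search_list kmer_search_list)

-- ===== LEMMAS AND PROOFS =====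

-- the stop values of front searches / start values of back searches as B's loop sees them
def frontStops (ps : List (Int × Option Int)) : List Int :=
  ps.filterMap (fun p => match p.2 with
    | some v => if p.1 = 0 then some v else none
    | none => none)

def backStarts (ps : List (Int × Option Int)) : List Int :=
  ps.filterMap (fun p => match p.2 with
    | none => if p.1 = 0 then none else some p.1
    | some _ => none)

def foldMax (s : Bool × Int) (l : List Int) : Bool × Int :=
  l.foldl (fun s v => (true, if !s.1 || v > s.2 then v else s.2)) s

def foldMin (s : Bool × Int) (l : List Int) : Bool × Int :=
  l.foldl (fun s v => (true, if !s.1 || v < s.2 then v else s.2)) s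

theorem foldB_char (ps : List (Int × Option Int)) (st : MState) :
    ps.foldl updB st =
      ⟨st.sawFull || ps.contains ((0 : Int), (none : Option Int)),
       (foldMax (st.hasFront, st.maxFront) (frontStops ps)).1,
       (foldMax (st.hasFront, st.maxFront) (frontStops ps)).2,
       (foldMin (st.hasBack, st.minBack) (backStarts ps)).1,
       (foldMin (st.hasBack, st.minBack) (backStarts ps)).2,
       st.hasMiddle || !(ps.filter (fun p => p.1 != 0 && p.2 != none)).isEmpty⟩ := by
  induction ps generalizing st with
  | nil => simp [frontStops, backStarts, foldMax, foldMin]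
  | cons p ps ih =>
    obtain ⟨s, t⟩ := p
    match t with
    | none =>
      by_cases hs : s = 0
      · simp [List.foldl_cons, updB, frontStops, backStarts, foldMax, foldMin, ih, hs]
      · have hs' : ¬ (0 : Int) = s := fun h => hs h.symm
        simp [List.foldl_cons, updB, frontStops, backStarts, foldMax, foldMin, ih, hs, hs']
    | some v =>
      by_cases hs : s = 0 <;>
        simp [List.foldl_cons, updB, frontStops, backStarts, foldMax, foldMin, ih, hs]

theorem foldMax_true (l : List Int) (m : Int) :
    foldMax (true, m) l = (true, l.foldl max m) := by
  induction l generalizing m with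
  | nil => rfl
  | cons x xs ih =>
    have hx : ((true : Bool), if (!(true : Bool) || decide (x > m)) = true then x else m) =
        (true, max m x) := by
      simp only [Bool.not_true, Bool.false_or, decide_eq_true_eq]
      congr 1
      split_ifs <;> omega
    show foldMax ((true : Bool), if (!(true : Bool) || decide (x > m)) = true then x else m) xs =
      (true, (x :: xs).foldl max m)
    rw [hx, ih, List.foldl_cons]

theorem foldMin_true (l : List Int) (m : Int) :
    foldMin (true, m) l = (true, l.foldl min m) := by
  induction l generalizing m with
  | nil => rfl
  | cons x xs ih =>
    have hx : ((true : Bool), if (!(true : Bool) || decide (x < m)) = true then x else m) =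
        (true, min m x) := by
      simp only [Bool.not_true, Bool.false_or, decide_eq_true_eq]
      congr 1
      split_ifs <;> omega
    show foldMin ((true : Bool), if (!(true : Bool) || decide (x < m)) = true then x else m) xs =
      (true, (x :: xs).foldl min m)
    rw [hx, ih, List.foldl_cons]

theorem foldMax_false (l : List Int) :
    foldMax (false, 0) l = match l with
      | [] => (false, 0)
      | x :: xs => (true, xs.foldl max x) := by
  match l with
  | [] => rfl
  | x :: xs =>
    simp only [foldMax, List.foldl_cons]
    exact foldMax_true xs x

theorem foldMin_false (l : List Int) :
    foldMin (false, 0) l = match l with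
      | [] => (false, 0)
      | x :: xs => (true, xs.foldl min x) := by
  match l with
  | [] => rfl
  | x :: xs =>
    simp only [foldMin, List.foldl_cons]
    exact foldMin_true xs x

-- when (0, none) is not among the positions:
theorem front_map_of_not_full (ps : List (Int × Option Int))
    (h : ((0 : Int), (none : Option Int)) ∉ ps) :
    (ps.filter (fun p => p.1 == 0)).map (·.2) = (frontStops ps).map some := by
  induction ps with
  | nil => rfl
  | cons p ps ih =>
    have hp : p ≠ ((0 : Int), (none : Option Int)) := by
      intro he; exact h (he ▸ List.mem_cons_self)
    have hps := ih (fun hm => h (List.mem_cons_of_mem _ hm))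
    obtain ⟨s, t⟩ := p
    match t with
    | none =>
      have hs : s ≠ 0 := by intro he; exact hp (by simp [he])
      simpa [frontStops, hs] using hps
    | some v =>
      by_cases hs : s = 0 <;> simpa [frontStops, hs] using hps

theorem back_map_of_not_full (ps : List (Int × Option Int))
    (h : ((0 : Int), (none : Option Int)) ∉ ps) :
    (ps.filter (fun p => p.2 == none)).map (·.1) = backStarts ps := by
  induction ps with
  | nil => rfl
  | cons p ps ih =>
    have hp : p ≠ ((0 : Int), (none : Option Int)) := by
      intro he; exact h (he ▸ List.mem_cons_self)
    have hps := ih (fun hm => h (List.mem_cons_of_mem _ hm))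
    obtain ⟨s, t⟩ := p
    match t with
    | none =>
      have hs : s ≠ 0 := by intro he; exact hp (by simp [he])
      simpa [backStarts, hs] using hps
    | some v =>
      by_cases hs : s = 0 <;> simpa [backStarts, hs] using hps

-- per-group agreement, for any positions list on which A does not raise
theorem step_eq (acc : List (String × Int × Option Int)) (k : String)
    (ps : List (Int × Option Int))
    (hok : ps.length = 1 ∨ ((0 : Int), (none : Option Int)) ∈ ps ∨
           ps.filter (fun p => p.1 != 0 && p.2 != none) = []) :
    stepA (some acc) (k, ps) = stepB (some acc) (k, ps) := by
  by_cases h1 : ps.length == 1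
  · simp [stepA, stepB, h1]
  · have hchar := foldB_char ps ⟨false, false, 0, false, 0, false⟩
    by_cases hmem : ((0 : Int), (none : Option Int)) ∈ ps
    · have hc : ps.contains ((0 : Int), (none : Option Int)) = true := by simpa using hmem
      simp [stepA, stepB, h1, hchar, hmem]
    · have hc : ps.contains ((0 : Int), (none : Option Int)) = false := by simpa using hmem
      have hmid : ps.filter (fun p => p.1 != 0 && p.2 != none) = [] := by
        rcases hok with h | h | h
        · exact absurd (by simpa using h) h1
        · exact absurd h hmem
        · exact h
      have hfs := front_map_of_not_full ps hmem
      have hbs := back_map_of_not_full ps hmem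
      have hfe : ((ps.filter (fun p => p.1 == 0)).isEmpty) = (frontStops ps).isEmpty := by
        rw [← List.isEmpty_map (f := fun (p : Int × Option Int) => p.2), hfs, List.isEmpty_map]
      have hbe : ((ps.filter (fun p => p.2 == none)).isEmpty) = (backStarts ps).isEmpty := by
        rw [← List.isEmpty_map (f := fun (p : Int × Option Int) => p.1), hbs]
      simp only [stepA, stepB, h1, hc, Bool.false_eq_true, if_false, hchar, hmid,
        List.isEmpty_nil, Bool.false_or]
      rcases hL : frontStops ps with _ | ⟨x, xs⟩ <;>
        rcases hM : backStarts ps with _ | ⟨y, ys⟩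
      · have hf : (ps.filter (fun p => p.1 == 0)).isEmpty = true := by rw [hfe, hL]; rfl
        have hb : (ps.filter (fun p => p.2 == none)).isEmpty = true := by rw [hbe, hM]; rfl
        rw [hf, hb]
        simp [foldMax_false, foldMin_false]
      · have hf : (ps.filter (fun p => p.1 == 0)).isEmpty = true := by rw [hfe, hL]; rfl
        have hb : (ps.filter (fun p => p.2 == none)).isEmpty = false := by rw [hbe, hM]; rfl
        rw [hbs, hM, hf, hb]
        simp [foldMax_false, foldMin_false, pyMinInts]
      · have hf : (ps.filter (fun p => p.1 == 0)).isEmpty = false := by rw [hfe, hL]; rfl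
        have hb : (ps.filter (fun p => p.2 == none)).isEmpty = true := by rw [hbe, hM]; rfl
        rw [hfs, hL, hf, hb]
        simp [foldMax_false, foldMin_false, pyMaxStops]
      · have hf : (ps.filter (fun p => p.1 == 0)).isEmpty = false := by rw [hfe, hL]; rfl
        have hb : (ps.filter (fun p => p.2 == none)).isEmpty = false := by rw [hbe, hM]; rfl
        rw [hfs, hL, hbs, hM, hf, hb]
        simp [foldMax_false, foldMin_false, pyMaxStops, pyMinInts]

-- group contents of the dict built by the grouping fold
def groupOf (k : String) (l : List (String × Int × Option Int)) : List (Int × Option Int) :=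
  (l.filter (fun q => q.1 == k)).map (·.2)

theorem mem_groupOf {k : String} {s : Int} {t : Option Int}
    {l : List (String × Int × Option Int)} :
    (s, t) ∈ groupOf k l ↔ (k, s, t) ∈ l := by
  simp only [groupOf, List.mem_map, List.mem_filter]
  constructor
  · rintro ⟨⟨k', s', t'⟩, ⟨hm, hk⟩, he⟩
    simp at hk he
    obtain ⟨he1, he2⟩ := he
    subst hk; cases he1; cases he2; exact hm
  · intro hm
    exact ⟨(k, s, t), ⟨hm, by simp⟩, rfl⟩

-- ===== VERDICT (by name: the statement is the Claim_ definition above) =====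
theorem minimize_kmer_search_list_spec : Claim_equal_minimize_kmer_search_list := by
  intro l _hdom hpre
  unfold Spec_minimize_kmer_search_list minimize_kmer_search_list minimize_kmer_search_list_alt
  simp only []
  congr 1
  apply PySem.List.foldl_congr_mem
  intro acc item hitem
  match acc with
  | none => rfl
  | some acc =>
    obtain ⟨k, ps⟩ := item
    have hnodup : (l.foldl (fun d p => d.modify p.1 [] (· ++ [p.2]))
        (PySem.Dict.empty : PySem.Dict String (List (Int × Option Int)))).keys.Nodup := by
      exact PySem.Dict.nodup_keys_foldl_modify_key l (·.1) [] (fun _d p => (· ++ [p.2])) _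
        PySem.Dict.nodup_keys_empty
    have hget := PySem.Dict.getD_of_mem_items _ hitem hnodup (d0 := [])
    have hps : ps = groupOf k l := by
      rw [← hget, PySem.Dict.getD_foldl_modify_append, PySem.Dict.getD_empty]
      rfl
    apply step_eq
    by_cases h1 : ps.length = 1
    · exact Or.inl h1
    by_cases hmem : ((0 : Int), (none : Option Int)) ∈ ps
    · exact Or.inr (Or.inl hmem)
    refine Or.inr (Or.inr ?_)
    rw [List.filter_eq_nil_iff]
    rintro ⟨s, t⟩ hm hmid
    simp only [bne_iff_ne, ne_eq, Bool.and_eq_true] at hmid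
    have hml : (k, s, t) ∈ l := mem_groupOf.mp (hps ▸ hm)
    rcases hpre (k, s, t) hml with h | h | h | h
    · have h' : (l.filter (fun q => q.1 == k)).length ≤ 1 := h
      have hlen : (l.filter (fun q => q.1 == k)).length = ps.length := by
        rw [hps]; simp [groupOf]
      have hpos : 0 < ps.length := List.length_pos_of_mem hm
      omega
    · exact hmem (hps ▸ mem_groupOf.mpr h)
    · exact hmid.1 h
    · exact hmid.2 h
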